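-- pv_equiv track=rewrite | github.com/Wilson930603/jewelry-websites-scraper | jewelery/spiders/joyeriasuarez.py | get_cut
-- ===== SOURCE A (Python) =====
-- def get_cut(description):
--     match_word = '-cut'
--     if match_word in description.lower():
--         words = description.split()
--         for itr in range(len(words)):
--             if match_word in words[itr].lower():
--                 temp = words[itr].lower().split(match_word)[0]
--                 temp +=match_word
--                 return temp
-- ===== SOURCE B (Python) =====
-- def get_cut(description):
--     # Index-scan: locate the first occurrence of the pattern in the lowered string, then walk back
--     # to the previous whitespace to recover the token prefix; no word splitting.
--     low = description.lower()
--     idx = low.find('-cut')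
--     if idx == -1:
--         return None
--     start = idx
--     while start > 0 and not low[start - 1].isspace():
--         start -= 1
--     return low[start:idx] + '-cut'
-- ===== Notes on version B (the rewrite author's own statement) =====
-- stated objective: alternative
-- what changed: Replaced the split-into-words loop with per-word membership tests and a per-word split by a single find of the first occurrence of the pattern in the lowered string plus a backward scan to the preceding whitespace.
import Mathlib
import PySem

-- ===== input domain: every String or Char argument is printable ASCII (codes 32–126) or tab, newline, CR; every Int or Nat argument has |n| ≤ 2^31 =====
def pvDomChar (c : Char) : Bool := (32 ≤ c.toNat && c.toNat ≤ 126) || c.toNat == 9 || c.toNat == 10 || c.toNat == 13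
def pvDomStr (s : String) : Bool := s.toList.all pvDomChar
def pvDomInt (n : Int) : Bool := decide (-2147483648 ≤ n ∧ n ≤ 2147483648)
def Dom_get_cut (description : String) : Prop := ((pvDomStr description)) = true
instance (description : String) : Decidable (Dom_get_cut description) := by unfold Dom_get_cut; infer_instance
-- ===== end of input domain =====

-- B replaces A's word-list loop by one find of the pattern in the lowered string plus a
-- backward scan to the previous whitespace; same return value everywhere (alternative, speed not claimed).

-- ===== PORT A =====
-- the 'for itr in range(len(words))' loop with early return, as structural recursion over the words
def getCutLoopA (match_word : List Char) (words : List (List Char)) : Option (List Char) :=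
  match words with
  | [] => none
  | w :: rest =>
    if PySem.Chars.isIn match_word (PySem.Chars.lower w) then
      some (((PySem.Chars.splitOn (PySem.Chars.lower w) match_word).headD []) ++ match_word)
    else getCutLoopA match_word rest

def get_cut (description : String) : Option String :=
  let match_word : List Char := ['-', 'c', 'u', 't']
  if PySem.Chars.isIn match_word (PySem.Chars.lower description.toList) then
    (getCutLoopA match_word (PySem.Chars.split₀ description.toList)).map String.ofList
  else
    none

-- ===== PORT B =====
-- the 'while start > 0 and not low[start-1].isspace(): start -= 1' loop
def tokStartB (low : List Char) : Nat → Nat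
  | 0 => 0
  | j + 1 => if PySem.Chars.isspace (low.getD j ' ') then j + 1 else tokStartB low j

def get_cut_alt (description : String) : Option String :=
  let low : List Char := PySem.Chars.lower description.toList
  let idx : Int := PySem.Chars.find low ['-', 'c', 'u', 't']
  if idx = -1 then
    none
  else
    let start : Nat := tokStartB low idx.toNat
    some (String.ofList (PySem.List.slice low (some (start : Int)) (some idx) ++ ['-', 'c', 'u', 't']))

-- ===== PRECONDITION & SPEC =====
def Spec_get_cut (description : String) (out : Option String) : Prop := out = get_cut_alt description
instance (description : String) (out : Option String) : Decidable (Spec_get_cut description out) := by unfold Spec_get_cut; infer_instance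

-- ===== CLAIM (what is proved, stated in full; the proofs are below) =====
def Claim_equal_get_cut : Prop := ∀ (description : String), Dom_get_cut description → Spec_get_cut description (get_cut description)

-- ===== LEMMAS AND PROOFS =====

-- the pattern A and B search for
def patCut : List Char := ['-', 'c', 'u', 't']

-- reference scanner: walk the lowered string once, keeping the reversed current-token prefix
def Fscan (cur : List Char) : List Char → Option (List Char)
  | [] => none
  | c :: rest =>
    if patCut <+: (c :: rest) then some (cur.reverse ++ patCut)
    else if PySem.Chars.isspace c then Fscan [] rest
    else Fscan (c :: cur) rest

-- what Fscan computes, phrased through find/tokStartB (B's shape)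
def Xres (low : List Char) : Option (List Char) :=
  if PySem.Chars.find low patCut = -1 then none
  else some ((low.take (PySem.Chars.find low patCut).toNat).drop
      (tokStartB low (PySem.Chars.find low patCut).toNat) ++ patCut)

theorem patCut_ne_nil : patCut ≠ [] := by decide

theorem patCut_nonspace : ∀ a ∈ patCut, PySem.Chars.isspace a = false := by
  intro a ha
  simp only [patCut, List.mem_cons, List.not_mem_nil, or_false] at ha
  rcases ha with rfl | rfl | rfl | rfl <;> decide

theorem char_toNat_ofNat (n : Nat) (h : n < 55296) : (Char.ofNat n).toNat = n := by
  have hv : n.isValidChar := Or.inl h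
  simp [Char.ofNat, hv, Char.ofNatAux, Char.toNat]

theorem isupper_toNat (c : Char) (h : PySem.Chars.isupper c = true) :
    65 ≤ c.toNat ∧ c.toNat ≤ 90 := by
  simp only [PySem.Chars.isupper, Bool.and_eq_true, decide_eq_true_eq] at h
  obtain ⟨h1, h2⟩ := h
  rw [Char.le_def, UInt32.le_iff_toNat_le] at h1 h2
  have hA : ('A' : Char).val.toNat = 65 := by decide
  have hZ : ('Z' : Char).val.toNat = 90 := by decide
  rw [hA] at h1; rw [hZ] at h2
  exact ⟨h1, h2⟩

theorem isspace_false_of_range (c : Char) (h1 : 65 ≤ c.toNat) (h2 : c.toNat ≤ 122) :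
    PySem.Chars.isspace c = false := by
  simp only [PySem.Chars.isspace, Bool.or_eq_false_iff, Bool.and_eq_false_iff,
    decide_eq_false_iff_not]
  omega

theorem isupper_lowerChar (c : Char) :
    PySem.Chars.isupper (PySem.Chars.lowerChar c) = false := by
  by_cases h : PySem.Chars.isupper c = true
  · obtain ⟨h1, h2⟩ := isupper_toNat c h
    have ht : (Char.ofNat (c.toNat + 32)).toNat = c.toNat + 32 :=
      char_toNat_ofNat _ (by omega)
    simp only [PySem.Chars.lowerChar, h, if_true]
    simp only [PySem.Chars.isupper, Bool.and_eq_false_iff, decide_eq_false_iff_not,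
      Char.le_def, UInt32.le_iff_toNat_le]
    right
    intro hc
    have hZ : ('Z' : Char).val.toNat = 90 := by decide
    rw [hZ] at hc
    have h3 : (Char.ofNat (c.toNat + 32)).val.toNat = c.toNat + 32 := ht
    omega
  · have h' : PySem.Chars.isupper c = false := by simpa using h
    rw [PySem.Chars.lowerChar, h']
    simpa using h'

theorem lowerChar_idem (c : Char) :
    PySem.Chars.lowerChar (PySem.Chars.lowerChar c) = PySem.Chars.lowerChar c := by
  rw [show PySem.Chars.lowerChar (PySem.Chars.lowerChar c)
      = if PySem.Chars.isupper (PySem.Chars.lowerChar c) = true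
        then Char.ofNat ((PySem.Chars.lowerChar c).toNat + 32)
        else PySem.Chars.lowerChar c from rfl]
  rw [isupper_lowerChar c]
  simp

theorem isspace_lowerChar (c : Char) :
    PySem.Chars.isspace (PySem.Chars.lowerChar c) = PySem.Chars.isspace c := by
  by_cases h : PySem.Chars.isupper c = true
  · obtain ⟨h1, h2⟩ := isupper_toNat c h
    have ht : (Char.ofNat (c.toNat + 32)).toNat = c.toNat + 32 :=
      char_toNat_ofNat _ (by omega)
    simp only [PySem.Chars.lowerChar, h, if_true]
    rw [isspace_false_of_range _ (by omega) (by omega),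
      isspace_false_of_range c (by omega) (by omega)]
  · have h' : PySem.Chars.isupper c = false := by simpa using h
    rw [PySem.Chars.lowerChar, h']
    simp

theorem lower_fix (s : List Char) (h : ∀ a ∈ s, PySem.Chars.lowerChar a = a) :
    PySem.Chars.lower s = s := by
  rw [show PySem.Chars.lower s = s.map PySem.Chars.lowerChar from rfl]
  exact (List.map_congr_left h).trans (List.map_id s)

theorem mem_lower_fix (s : List Char) :
    ∀ a ∈ PySem.Chars.lower s, PySem.Chars.lowerChar a = a := by
  intro a ha
  simp only [PySem.Chars.lower, List.mem_map] at ha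
  obtain ⟨b, _, rfl⟩ := ha
  exact lowerChar_idem b

theorem lower_lower (s : List Char) :
    PySem.Chars.lower (PySem.Chars.lower s) = PySem.Chars.lower s :=
  lower_fix _ (mem_lower_fix s)

-- ---- split₀ structure ----

theorem split0_go_acc : ∀ (l cur : List Char) (acc : List (List Char)),
    PySem.Chars.split₀.go l cur acc = acc.reverse ++ PySem.Chars.split₀.go l cur [] := by
  intro l
  induction l with
  | nil =>
    intro cur acc
    simp only [PySem.Chars.split₀.go]
    split_ifs <;> simp
  | cons c rest ih =>
    intro cur acc
    simp only [PySem.Chars.split₀.go]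
    split_ifs with h1 h2
    · exact ih [] acc
    · rw [ih [] (cur.reverse :: acc), ih [] [cur.reverse]]
      simp
    · exact ih (c :: cur) acc

theorem split0_go_lower : ∀ (l cur : List Char) (acc : List (List Char)),
    PySem.Chars.split₀.go (l.map PySem.Chars.lowerChar) (cur.map PySem.Chars.lowerChar)
        (acc.map (List.map PySem.Chars.lowerChar))
      = (PySem.Chars.split₀.go l cur acc).map (List.map PySem.Chars.lowerChar) := by
  intro l
  induction l with
  | nil =>
    intro cur acc
    simp only [List.map_nil, PySem.Chars.split₀.go]
    by_cases h : cur = []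
    · subst h; simp
    · have h' : cur.isEmpty = false := by simpa [List.isEmpty_iff] using h
      have h2 : (cur.map PySem.Chars.lowerChar).isEmpty = false := by
        simp [h]
      simp [h', h2, List.map_reverse]
  | cons c rest ih =>
    intro cur acc
    simp only [List.map_cons, PySem.Chars.split₀.go, isspace_lowerChar]
    by_cases h1 : PySem.Chars.isspace c = true
    · simp only [h1, if_true]
      by_cases h : cur = []
      · subst h
        simpa using ih [] acc
      · have h' : cur.isEmpty = false := by simpa [List.isEmpty_iff] using h
        have h2 : (cur.map PySem.Chars.lowerChar).isEmpty = false := by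
          simp [h]
        simp only [h', h2, Bool.false_eq_true, if_false]
        have h3 := ih [] (cur.reverse :: acc)
        simpa [List.map_reverse] using h3
    · have h1' : PySem.Chars.isspace c = false := by simpa using h1
      simp only [h1', Bool.false_eq_true, if_false]
      simpa using ih (c :: cur) acc

theorem split0_lower (s : List Char) :
    PySem.Chars.split₀ (PySem.Chars.lower s)
      = (PySem.Chars.split₀ s).map PySem.Chars.lower := by
  have hmap : List.map PySem.Chars.lower = List.map (List.map PySem.Chars.lowerChar) := by
    funext xs
    rfl
  rw [hmap]
  have := split0_go_lower s [] []
  simpa [PySem.Chars.split₀, PySem.Chars.lower] using this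

theorem loop_map_lower : ∀ (ws : List (List Char)),
    getCutLoopA patCut (ws.map PySem.Chars.lower) = getCutLoopA patCut ws := by
  intro ws
  induction ws with
  | nil => rfl
  | cons w rest ih =>
    simp only [List.map_cons, getCutLoopA, lower_lower, ih]

theorem nonspace_takeWhile (l : List Char) :
    l.takeWhile (fun a => !PySem.Chars.isspace a) <+: l := List.takeWhile_prefix _

theorem split0_go_word : ∀ (l cur : List Char),
    (cur ≠ [] ∨ ∃ c rest, l = c :: rest ∧ PySem.Chars.isspace c = false) →
    ∃ ws, PySem.Chars.split₀.go l cur [] =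
      (cur.reverse ++ l.takeWhile (fun a => !PySem.Chars.isspace a)) :: ws := by
  intro l
  induction l with
  | nil =>
    intro cur h
    rcases h with h | ⟨c, rest, h, _⟩
    · refine ⟨[], ?_⟩
      simp [PySem.Chars.split₀.go, List.isEmpty_iff, h]
    · simp at h
  | cons c rest ih =>
    intro cur h
    by_cases hs : PySem.Chars.isspace c = true
    · have hcur : cur ≠ [] := by
        rcases h with h | ⟨c', rest', he, hns⟩
        · exact h
        · exfalso
          injection he with e1 e2
          rw [← e1] at hns
          rw [hs] at hns
          cases hns
      have hne : cur.isEmpty = false := by simpa [List.isEmpty_iff] using hcur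
      refine ⟨PySem.Chars.split₀.go rest [] [], ?_⟩
      simp only [PySem.Chars.split₀.go, hs, if_true, hne, Bool.false_eq_true, if_false]
      rw [split0_go_acc rest [] [cur.reverse]]
      simp [hs]
    · have hs' : PySem.Chars.isspace c = false := by simpa using hs
      obtain ⟨ws, hws⟩ := ih (c :: cur) (Or.inl (by simp))
      refine ⟨ws, ?_⟩
      simp only [PySem.Chars.split₀.go, hs', Bool.false_eq_true, if_false]
      rw [hws]
      simp [hs']

-- ---- splitOn structure ----

theorem splitOn_go_acc (sep : List Char) : ∀ (fuel : Nat) (l cur : List Char)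
    (acc : List (List Char)),
    PySem.Chars.splitOn.go sep fuel l cur acc
      = acc.reverse ++ PySem.Chars.splitOn.go sep fuel l cur [] := by
  intro fuel
  induction fuel with
  | zero => intro l cur acc; simp [PySem.Chars.splitOn.go]
  | succ fuel ih =>
    intro l cur acc
    cases l with
    | nil => simp [PySem.Chars.splitOn.go]
    | cons c rest =>
      simp only [PySem.Chars.splitOn.go]
      split_ifs with h
      · rw [ih _ [] (cur.reverse :: acc), ih _ [] [cur.reverse]]
        simp
      · exact ih rest (c :: cur) acc

theorem splitOn_go_head : ∀ (fuel : Nat) (l cur : List Char) (k : Nat),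
    patCut <+: l.drop k → (∀ i < k, ¬ patCut <+: l.drop i) → l.length < fuel →
    (PySem.Chars.splitOn.go patCut fuel l cur []).headD [] = cur.reverse ++ l.take k := by
  intro fuel
  induction fuel with
  | zero => intro l cur k _ _ h; omega
  | succ fuel ih =>
    intro l cur k hk hmin hlen
    cases l with
    | nil =>
      exfalso
      rw [List.drop_nil] at hk
      exact patCut_ne_nil (List.prefix_nil.mp hk)
    | cons c rest =>
      by_cases hp : patCut <+: (c :: rest)
      · have hk0 : k = 0 := by
          by_contra hne
          exact hmin 0 (by omega) (by simpa using hp)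
        subst hk0
        have hbp : patCut.isPrefixOf (c :: rest) = true := by
          rw [List.isPrefixOf_iff_prefix]; exact hp
        simp only [PySem.Chars.splitOn.go, hbp, if_true]
        rw [splitOn_go_acc]
        simp
      · have hk0 : k ≠ 0 := by rintro rfl; exact hp (by simpa using hk)
        obtain ⟨k', rfl⟩ : ∃ k', k = k' + 1 := ⟨k - 1, by omega⟩
        have hbp : patCut.isPrefixOf (c :: rest) = false := by
          rw [Bool.eq_false_iff]
          intro hc
          exact hp (List.isPrefixOf_iff_prefix.mp hc)
        simp only [PySem.Chars.splitOn.go, hbp, Bool.false_eq_true, if_false]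
        have h4 := ih rest (c :: cur) k' (by simpa using hk)
          (fun i hi => by simpa using hmin (i + 1) (by omega))
          (by simp at hlen; omega)
        rw [h4]
        simp

-- ---- prefix bookkeeping ----

theorem prefix_takeWhile {p : Char → Bool} : ∀ {pre l : List Char},
    pre <+: l → (∀ a ∈ pre, p a = true) → pre <+: l.takeWhile p := by
  intro pre
  induction pre with
  | nil => intro l _ _; exact List.nil_prefix
  | cons a pre' ih =>
    intro l hpre hall
    cases l with
    | nil => exact absurd (List.prefix_nil.mp hpre) (by simp)
    | cons b l' =>
      rw [List.cons_prefix_cons] at hpre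
      obtain ⟨rfl, htl⟩ := hpre
      have ha : p a = true := hall a (by simp)
      rw [List.takeWhile_cons, ha]
      simpa using ih htl (fun x hx => hall x (by simp [hx]))

theorem prefix_extend {x y l : List Char} (h : x <+: y) : x <+: y ++ l :=
  h.trans (List.prefix_append y l)

theorem prefix_drop_infix {l x : List Char} {j : Nat} (h : x <+: l.drop j) : x <:+: l := by
  obtain ⟨t, ht⟩ := h
  exact ⟨l.take j, t, by rw [List.append_assoc, ht, List.take_append_drop]⟩

theorem noOcc_isIn_false (cur l : List Char)
    (hmin : ∀ i < cur.length, ¬ patCut <+: (cur.reverse.drop i ++ l)) :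
    PySem.Chars.isIn patCut cur.reverse = false := by
  rw [PySem.Chars.isIn_eq_false_iff]
  intro hinf
  obtain ⟨j, hj⟩ := (PySem.Chars.exists_prefix_drop_iff_isIn patCut cur.reverse).mpr
    ((PySem.Chars.isIn_iff_infix patCut cur.reverse).mpr hinf)
  by_cases hjl : j < cur.length
  · exact hmin j hjl (prefix_extend hj)
  · rw [List.drop_eq_nil_of_le (by simpa using not_lt.mp hjl)] at hj
    exact patCut_ne_nil (List.prefix_nil.mp hj)

-- ---- A's loop equals the scanner ----

theorem loopA_eq_Fscan : ∀ (l cur : List Char),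
    (∀ a ∈ l, PySem.Chars.lowerChar a = a) →
    (∀ a ∈ cur, PySem.Chars.lowerChar a = a) →
    (∀ i < cur.length, ¬ patCut <+: (cur.reverse.drop i ++ l)) →
    getCutLoopA patCut (PySem.Chars.split₀.go l cur []) = Fscan cur l := by
  intro l
  induction l with
  | nil =>
    intro cur _ hcur hmin
    simp only [PySem.Chars.split₀.go]
    by_cases hc : cur = []
    · simp [hc, getCutLoopA, Fscan]
    · have hne : cur.isEmpty = false := by simpa [List.isEmpty_iff] using hc
      have hfix : PySem.Chars.lower cur.reverse = cur.reverse :=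
        lower_fix _ (fun a ha => hcur a (by simpa using ha))
      have hno := noOcc_isIn_false cur [] (by simpa using hmin)
      simp [hne, getCutLoopA, hfix, hno, Fscan]
  | cons c rest ih =>
    intro cur hl hcur hmin
    by_cases hp : patCut <+: (c :: rest)
    · -- the first occurrence starts here: A returns from the current word
      have hc : c = '-' := by
        rw [show patCut = '-' :: ['c','u','t'] from rfl, List.cons_prefix_cons] at hp
        exact hp.1.symm
      have hcs : PySem.Chars.isspace c = false := by rw [hc]; decide
      obtain ⟨ws, hws⟩ := split0_go_word (c :: rest) cur (Or.inr ⟨c, rest, rfl, hcs⟩)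
      rw [hws]
      set tw := (c :: rest).takeWhile (fun a => !PySem.Chars.isspace a) with htw
      set w := cur.reverse ++ tw with hw
      have htwpre : tw <+: (c :: rest) := nonspace_takeWhile _
      have hfixw : PySem.Chars.lower w = w := by
        refine lower_fix _ ?_
        intro a ha
        rw [hw, List.mem_append] at ha
        rcases ha with ha | ha
        · exact hcur a (by simpa using ha)
        · exact hl a (htwpre.subset ha)
      have hpat_tw : patCut <+: tw :=
        prefix_takeWhile hp (by intro a ha; simp [patCut_nonspace a ha])
      have hocc : patCut <+: w.drop cur.length := by
        rw [hw, show cur.length = cur.reverse.length from (List.length_reverse).symm,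
          List.drop_left]
        exact hpat_tw
      have hmin' : ∀ i < cur.length, ¬ patCut <+: w.drop i := by
        intro i hi hbad
        apply hmin i hi
        rw [hw, List.drop_append_of_le_length (by simpa using le_of_lt hi)] at hbad
        obtain ⟨t, ht⟩ := htwpre
        refine hbad.trans ⟨t, ?_⟩
        rw [List.append_assoc, ht]
      have hisin : PySem.Chars.isIn patCut w = true := by
        rw [PySem.Chars.isIn_iff_infix]
        exact prefix_drop_infix hocc
      have hhead : (PySem.Chars.splitOn w patCut).headD [] = cur.reverse := by
        have h3 := splitOn_go_head (w.length + 1) w [] cur.length hocc hmin' (by omega)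
        rw [PySem.Chars.splitOn, h3]
        rw [hw, show cur.length = cur.reverse.length from (List.length_reverse).symm,
          List.take_left]
        simp
      simp only [getCutLoopA, hfixw, hisin, if_true, hhead]
      simp only [Fscan, hp, if_true]
    · -- no occurrence at this position
      by_cases hs : PySem.Chars.isspace c = true
      · by_cases hc : cur = []
        · subst hc
          simp only [PySem.Chars.split₀.go, hs, if_true, List.isEmpty_nil, if_true]
          rw [ih [] (fun a ha => hl a (by simp [ha])) (by simp) (by simp)]
          simp [Fscan, hp, hs]
        · have hne : cur.isEmpty = false := by simpa [List.isEmpty_iff] using hc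
          simp only [PySem.Chars.split₀.go, hs, if_true, hne, Bool.false_eq_true, if_false]
          rw [split0_go_acc rest [] [cur.reverse]]
          have hfix : PySem.Chars.lower cur.reverse = cur.reverse :=
            lower_fix _ (fun a ha => hcur a (by simpa using ha))
          have hno := noOcc_isIn_false cur (c :: rest) hmin
          simp only [List.reverse_cons, List.reverse_nil, List.nil_append,
            List.singleton_append, getCutLoopA, hfix, hno, Bool.false_eq_true, if_false]
          rw [ih [] (fun a ha => hl a (by simp [ha])) (by simp) (by simp)]
          simp [Fscan, hp, hs]
      · have hs' : PySem.Chars.isspace c = false := by simpa using hs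
        simp only [PySem.Chars.split₀.go, hs', Bool.false_eq_true, if_false]
        have hmin2 : ∀ i < (c :: cur).length, ¬ patCut <+: ((c :: cur).reverse.drop i ++ rest) := by
          intro i hi
          simp only [List.reverse_cons]
          by_cases hic : i < cur.length
          · rw [List.drop_append_of_le_length (by simpa using le_of_lt hic)]
            rw [List.append_assoc]
            exact hmin i hic
          · have hieq : i = cur.length := by simp at hi; omega
            subst hieq
            rw [show cur.length = cur.reverse.length from (List.length_reverse).symm,
              List.drop_left]
            simpa using hp
        rw [ih (c :: cur) (fun a ha => hl a (by simp [ha]))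
          (by
            intro a ha
            rcases List.mem_cons.mp ha with rfl | ha
            · exact hl a (by simp)
            · exact hcur a ha) hmin2]
        simp [Fscan, hp, hs']

-- ---- the scanner equals B's shape ----

theorem tokStartB_le (low : List Char) : ∀ j, tokStartB low j ≤ j := by
  intro j
  induction j with
  | zero => simp [tokStartB]
  | succ j ih =>
    simp only [tokStartB]
    split_ifs
    · exact le_refl _
    · omega

theorem find_at (low : List Char) (j : Nat)
    (hocc : patCut <+: low.drop j) (hmin : ∀ i < j, ¬ patCut <+: low.drop i) :
    PySem.Chars.find low patCut = (j : Int) := by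
  have hinf : patCut <:+: low := prefix_drop_infix hocc
  have hpos : 0 ≤ PySem.Chars.find low patCut :=
    (PySem.Chars.find_nonneg_iff low patCut).mpr hinf
  obtain ⟨h1, h2⟩ := PySem.Chars.find_spec hpos
  have hle : (PySem.Chars.find low patCut).toNat ≤ j := by
    by_contra hgt
    exact h2 j (by omega) hocc
  have hge : j ≤ (PySem.Chars.find low patCut).toNat := by
    by_contra hgt
    exact hmin _ (by omega) h1
  omega

theorem no_find (low : List Char) (hmin : ∀ i < low.length, ¬ patCut <+: low.drop i) :
    PySem.Chars.find low patCut = -1 := by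
  rw [PySem.Chars.find_eq_neg_one_iff]
  intro hinf
  obtain ⟨j, hj⟩ := (PySem.Chars.exists_prefix_drop_iff_isIn patCut low).mpr
    ((PySem.Chars.isIn_iff_infix patCut low).mpr hinf)
  by_cases hjl : j < low.length
  · exact hmin j hjl hj
  · rw [List.drop_eq_nil_of_le (not_lt.mp hjl)] at hj
    exact patCut_ne_nil (List.prefix_nil.mp hj)

theorem Fscan_eq_Xres : ∀ (n : Nat) (low : List Char) (j : Nat),
    low.length - j ≤ n → j ≤ low.length →
    (∀ i < j, ¬ patCut <+: low.drop i) →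
    Fscan (((low.take j).drop (tokStartB low j)).reverse) (low.drop j) = Xres low := by
  intro n
  induction n with
  | zero =>
    intro low j hn hj hmin
    have hje : j = low.length := by omega
    subst hje
    rw [List.drop_length, Xres, no_find low hmin, if_pos rfl]
    rfl
  | succ n ih =>
    intro low j hn hj hmin
    by_cases hje : j = low.length
    · subst hje
      rw [List.drop_length, Xres, no_find low hmin, if_pos rfl]
      rfl
    · have hjlt : j < low.length := by omega
      have hgd : low.getD j ' ' = low[j] := by
        simp [List.getD, List.getElem?_eq_getElem hjlt]
      rw [List.drop_eq_getElem_cons hjlt]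
      by_cases hp : patCut <+: (low[j] :: low.drop (j + 1))
      · have hocc : patCut <+: low.drop j := by
          rw [List.drop_eq_getElem_cons hjlt]; exact hp
        have hfind := find_at low j hocc hmin
        have hne : PySem.Chars.find low patCut ≠ -1 := by rw [hfind]; omega
        rw [Xres, if_neg hne, hfind]
        simp only [Fscan, hp, if_true, List.reverse_reverse, Int.toNat_natCast]
      · have hmin1 : ∀ i < j + 1, ¬ patCut <+: low.drop i := by
          intro i hi
          by_cases hij : i < j
          · exact hmin i hij
          · have hieq : i = j := by omega
            subst hieq
            rw [List.drop_eq_getElem_cons hjlt]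
            exact hp
        by_cases hs : PySem.Chars.isspace low[j] = true
        · have hts : tokStartB low (j + 1) = j + 1 := by
            simp only [tokStartB]
            rw [hgd, hs]
            simp
          have hcur : ((low.take (j + 1)).drop (tokStartB low (j + 1))).reverse = [] := by
            rw [hts, List.drop_eq_nil_of_le (by simp)]
            rfl
          have h5 := ih low (j + 1) (by omega) (by omega) hmin1
          rw [hcur] at h5
          simp only [Fscan, hp, if_false, hs, if_true]
          exact h5
        · have hs' : PySem.Chars.isspace low[j] = false := by simpa using hs
          have hts : tokStartB low (j + 1) = tokStartB low j := by
            simp only [tokStartB]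
            rw [hgd, hs']
            simp
          have htle : tokStartB low j ≤ j := tokStartB_le low j
          have htake : low.take (j + 1) = low.take j ++ [low[j]] := by
            rw [List.take_add_one, List.getElem?_eq_getElem hjlt]
            rfl
          have hcur : ((low.take (j + 1)).drop (tokStartB low (j + 1))).reverse
              = low[j] :: ((low.take j).drop (tokStartB low j)).reverse := by
            rw [hts, htake, List.drop_append_of_le_length (by simp; omega)]
            simp
          have h5 := ih low (j + 1) (by omega) (by omega) hmin1
          rw [hcur] at h5
          simp only [Fscan, hp, if_false, hs', Bool.false_eq_true]
          exact h5

-- ===== VERDICT (by name: the statement is the Claim_ definition above) =====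
theorem get_cut_spec : Claim_equal_get_cut := by
  unfold Claim_equal_get_cut
  intro d _
  unfold Spec_get_cut
  show get_cut d = get_cut_alt d
  simp only [get_cut, get_cut_alt]
  rw [show (['-', 'c', 'u', 't'] : List Char) = patCut from rfl]
  set cs := d.toList with hcs
  set low := PySem.Chars.lower cs with hlow
  have hloop : getCutLoopA patCut (PySem.Chars.split₀ cs) = Fscan [] low := by
    rw [← loop_map_lower, ← split0_lower]
    rw [show PySem.Chars.split₀ low = PySem.Chars.split₀.go low [] [] from rfl]
    exact loopA_eq_Fscan low [] (mem_lower_fix cs) (by simp) (by simp)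
  have hF : Fscan [] low = Xres low := by
    have h6 := Fscan_eq_Xres low.length low 0 (by omega) (by omega)
      (fun i hi => absurd hi (by omega))
    simpa [tokStartB] using h6
  by_cases h : PySem.Chars.isIn patCut low = true
  · have hinf : patCut <:+: low := (PySem.Chars.isIn_iff_infix patCut low).mp h
    have hfge : 0 ≤ PySem.Chars.find low patCut :=
      (PySem.Chars.find_nonneg_iff low patCut).mpr hinf
    have hfne : PySem.Chars.find low patCut ≠ -1 := by omega
    set i : Nat := (PySem.Chars.find low patCut).toNat with hi
    have hicast : PySem.Chars.find low patCut = (i : Int) := by omega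
    rw [if_pos h, if_neg hfne, hloop, hF, Xres, if_neg hfne]
    simp only [Option.map_some]
    rw [hicast]
    simp only [Int.toNat_natCast]
    rw [PySem.List.slice_natCast, List.drop_take]
  · have h' : PySem.Chars.isIn patCut low = false := by simpa using h
    have hnf : PySem.Chars.find low patCut = -1 := by
      rw [PySem.Chars.find_eq_neg_one_iff]
      exact fun hinf => (by simpa [h'] using (PySem.Chars.isIn_iff_infix patCut low).mpr hinf)
    rw [if_neg (by simp [h']), if_pos hnf]
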